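-- pv_equiv track=rewrite | github.com/vyshna-22ds/data_analyst_agent | handlers/network_handler.py | _pick_edges_like
-- ===== SOURCE A (Python) =====
-- from typing import Dict, Any, List, Optional, Tuple
--
-- def _pick_edges_like(files: List[str]) -> Optional[str]:
--     priority = []
--     for p in files:
--         lp = p.lower()
--         if lp.endswith(".csv") and any(k in lp for k in ("edge", "graph", "network")):
--             priority.append(p)
--     if priority:
--         return priority[0]
--     for p in files:
--         if p.lower().endswith(".csv"):
--             return p
--     return None
-- ===== SOURCE B (Python) =====
-- from typing import List, Optional
--
-- def _pick_edges_like(files: List[str]) -> Optional[str]: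
--     first_csv = None
--     for p in files:
--         lp = p.lower()
--         if lp.endswith(".csv"):
--             if any(k in lp for k in ("edge", "graph", "network")):
--                 return p
--             if first_csv is None:
--                 first_csv = p
--     return first_csv
-- ===== Notes on version B (the rewrite author's own statement) =====
-- stated objective: simpler
-- what changed: Replaces A's two passes (build a full priority list, then rescan for any CSV) with one traversal that returns immediately on the first keyword CSV and remembers the first plain CSV in a single variable.
import Mathlib
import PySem

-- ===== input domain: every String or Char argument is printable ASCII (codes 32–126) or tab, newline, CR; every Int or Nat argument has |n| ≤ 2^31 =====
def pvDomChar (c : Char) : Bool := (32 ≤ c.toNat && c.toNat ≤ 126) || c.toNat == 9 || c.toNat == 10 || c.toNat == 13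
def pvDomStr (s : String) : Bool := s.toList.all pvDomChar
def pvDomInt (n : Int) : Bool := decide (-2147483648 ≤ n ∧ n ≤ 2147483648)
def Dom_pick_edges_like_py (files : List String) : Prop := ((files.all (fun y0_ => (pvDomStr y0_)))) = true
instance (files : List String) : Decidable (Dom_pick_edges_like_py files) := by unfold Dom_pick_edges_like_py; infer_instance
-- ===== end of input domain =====

-- B replaces A's two passes (priority list, then rescan for any CSV) with one traversal
-- carrying a remembered first plain CSV; objective: simpler.


-- ===== PORT A =====
-- second loop of A: return the first file whose lowercase name ends with ".csv"
def pickA_loop2 : List String → Option String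
  | [] => none
  | p :: rest =>
    if PySem.Str.endswith (PySem.Str.lower p) ".csv" then some p else pickA_loop2 rest

def pick_edges_like_py (files : List String) : Option String :=
  let priority := files.foldl (fun acc p =>
    let lp := PySem.Str.lower p
    if PySem.Str.endswith lp ".csv" &&
       (PySem.Str.isIn "edge" lp || PySem.Str.isIn "graph" lp || PySem.Str.isIn "network" lp)
    then acc ++ [p] else acc) []
  match priority with
  | q :: _ => some q
  | [] => pickA_loop2 files

-- ===== PORT B =====
-- single loop of B: return immediately on a keyword CSV, remember the first plain CSV
def pickB_loop (first_csv : Option String) : List String → Option String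
  | [] => first_csv
  | p :: rest =>
    let lp := PySem.Str.lower p
    if PySem.Str.endswith lp ".csv" then
      if PySem.Str.isIn "edge" lp || PySem.Str.isIn "graph" lp || PySem.Str.isIn "network" lp
      then some p
      else pickB_loop (if first_csv.isNone then some p else first_csv) rest
    else pickB_loop first_csv rest

def pick_edges_like_py_alt (files : List String) : Option String :=
  pickB_loop none files

-- ===== PRECONDITION & SPEC =====
def Spec_pick_edges_like_py (files : List String) (out : Option String) : Prop := out = pick_edges_like_py_alt files
instance (files : List String) (out : Option String) : Decidable (Spec_pick_edges_like_py files out) := by unfold Spec_pick_edges_like_py; infer_instance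

-- ===== CLAIM (what is proved, stated in full; the proofs are below) =====
def Claim_equal_pick_edges_like_py : Prop := ∀ (files : List String), Dom_pick_edges_like_py files → Spec_pick_edges_like_py files (pick_edges_like_py files)

-- ===== LEMMAS AND PROOFS =====

-- abbreviations for the two tests (proof-side only)
def pvKw (p : String) : Bool :=
  PySem.Str.endswith (PySem.Str.lower p) ".csv" &&
  (PySem.Str.isIn "edge" (PySem.Str.lower p) || PySem.Str.isIn "graph" (PySem.Str.lower p) ||
   PySem.Str.isIn "network" (PySem.Str.lower p))

theorem foldl_priority (files : List String) (acc : List String) :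
    files.foldl (fun acc p =>
      let lp := PySem.Str.lower p
      if PySem.Str.endswith lp ".csv" &&
         (PySem.Str.isIn "edge" lp || PySem.Str.isIn "graph" lp || PySem.Str.isIn "network" lp)
      then acc ++ [p] else acc) acc = acc ++ files.filter pvKw := by
  induction files generalizing acc with
  | nil => simp
  | cons p rest ih =>
    rw [List.foldl_cons, List.filter_cons, ih]
    show (if pvKw p = true then acc ++ [p] else acc) ++ _ = acc ++ (if pvKw p = true then _ else _)
    by_cases h : pvKw p = true
    · rw [if_pos h, if_pos h]; simp
    · rw [if_neg h, if_neg h]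

theorem pickB_loop_eq (files : List String) (fc : Option String) :
    pickB_loop fc files =
      match files.filter pvKw with
      | q :: _ => some q
      | [] => match fc with
              | some x => some x
              | none => pickA_loop2 files := by
  induction files generalizing fc with
  | nil => cases fc <;> rfl
  | cons p rest ih =>
    rw [List.filter_cons]
    show (if PySem.Str.endswith (PySem.Str.lower p) ".csv" = true then
            if (PySem.Str.isIn "edge" (PySem.Str.lower p) ||
                PySem.Str.isIn "graph" (PySem.Str.lower p) ||
                PySem.Str.isIn "network" (PySem.Str.lower p)) = true
            then some p
            else pickB_loop (if fc.isNone then some p else fc) rest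
          else pickB_loop fc rest) = _
    by_cases hcsv : PySem.Str.endswith (PySem.Str.lower p) ".csv" = true
    · by_cases hkw : (PySem.Str.isIn "edge" (PySem.Str.lower p) ||
        PySem.Str.isIn "graph" (PySem.Str.lower p) ||
        PySem.Str.isIn "network" (PySem.Str.lower p)) = true
      · have hp : pvKw p = true := by rw [pvKw, hcsv, hkw]; rfl
        rw [if_pos hcsv, if_pos hkw, if_pos hp]
      · have hp : pvKw p = false := by
          rw [pvKw, hcsv, Bool.eq_false_iff.mpr hkw]; rfl
        rw [if_pos hcsv, if_neg hkw, ih, hp]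
        simp only [Bool.false_eq_true, if_false]
        cases List.filter pvKw rest with
        | cons q t => rfl
        | nil =>
          cases fc with
          | some x => rfl
          | none =>
            show some p = pickA_loop2 (p :: rest)
            rw [pickA_loop2, if_pos hcsv]
    · have hc : PySem.Str.endswith (PySem.Str.lower p) ".csv" = false :=
        Bool.eq_false_iff.mpr hcsv
      have hp : pvKw p = false := by rw [pvKw, hc]; rfl
      rw [if_neg hcsv, ih, hp]
      simp only [Bool.false_eq_true, if_false]
      cases List.filter pvKw rest with
      | cons q t => rfl
      | nil =>
        cases fc with
        | some x => rfl
        | none =>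
          show pickA_loop2 rest = pickA_loop2 (p :: rest)
          rw [pickA_loop2, if_neg hcsv]

-- ===== VERDICT (by name: the statement is the Claim_ definition above) =====
theorem pick_edges_like_py_spec : Claim_equal_pick_edges_like_py := by
  intro files _
  unfold Spec_pick_edges_like_py pick_edges_like_py pick_edges_like_py_alt
  rw [foldl_priority files [], pickB_loop_eq files none]
  simp
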